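-- pv_equiv track=rewrite | github.com/primequantuM4/competitive_programming | RemoveSmallest.py | hasValidPairs
-- ===== SOURCE A (Python) =====
-- def hasValidPairs(arr):
--     if len(arr) == 1:
--         return True
--     arr.sort()
--     pairs = 0
--
--     for i in range(len(arr) - 1):
--         for j in range(i+1, len(arr)):
--             if arr[j] - arr[i] <= 1:
--                 pairs += 1
--                 break
--     return len(arr) - pairs == 1
-- ===== SOURCE B (Python) =====
-- def hasValidPairs(arr):
--     arr.sort()
--     return len(arr) > 0 and all(b - a <= 1 for a, b in zip(arr, arr[1:]))
-- ===== Notes on version B (the rewrite author's own statement) =====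
-- stated objective: faster
-- what changed: Replaces the quadratic nested scan (for each i, search all later j for a value within 1) by sorting once and a single linear pass over adjacent pairs, returning non-empty and all adjacent gaps <= 1.
import Mathlib
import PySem

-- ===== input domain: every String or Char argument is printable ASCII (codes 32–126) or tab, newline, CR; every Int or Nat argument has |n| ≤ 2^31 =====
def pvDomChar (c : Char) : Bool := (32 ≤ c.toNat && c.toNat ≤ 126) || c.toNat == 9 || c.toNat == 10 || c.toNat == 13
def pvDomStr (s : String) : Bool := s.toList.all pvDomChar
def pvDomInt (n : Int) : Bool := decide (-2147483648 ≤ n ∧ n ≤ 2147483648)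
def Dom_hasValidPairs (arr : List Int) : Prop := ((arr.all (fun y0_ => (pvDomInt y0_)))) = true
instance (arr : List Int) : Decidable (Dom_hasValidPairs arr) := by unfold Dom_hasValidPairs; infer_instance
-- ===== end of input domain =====

-- B sorts once and checks adjacent gaps in one pass instead of A's nested quadratic scan.
-- Both Pythons sort `arr` in place; the equivalence proved here is about the return value.

-- ===== PORT A =====
-- inner loop: 'for j in range(i+1, len(arr)): if arr[j] - arr[i] <= 1: pairs += 1; break'
-- (all indices are in range, so arr[j]/arr[i] are ported as pyGetD with default 0)
def pvInnerA (s : List Int) (i : Int) : List Int → Bool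
  | [] => false
  | j :: rest =>
    if PySem.List.pyGetD s j 0 - PySem.List.pyGetD s i 0 ≤ 1 then true
    else pvInnerA s i rest

def hasValidPairs (arr : List Int) : Bool :=
  if arr.length == 1 then true
  else
    let s := PySem.List.sorted arr (fun x => x) false
    let pairs : Int :=
      (PySem.List.pyRange 0 ((s.length : Int) - 1) 1).foldl
        (fun pairs i =>
          if pvInnerA s i (PySem.List.pyRange (i + 1) (s.length : Int) 1) then pairs + 1
          else pairs) 0
    decide ((s.length : Int) - pairs = 1)

-- ===== PORT B =====
def hasValidPairs_alt (arr : List Int) : Bool :=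
  let s := PySem.List.sorted arr (fun x => x) false
  decide (s.length > 0) &&
    (s.zip (PySem.List.slice s (some 1) none)).all (fun p => decide (p.2 - p.1 ≤ 1))

-- ===== PRECONDITION & SPEC =====
def Spec_hasValidPairs (arr : List Int) (out : Bool) : Prop := out = hasValidPairs_alt arr
instance (arr : List Int) (out : Bool) : Decidable (Spec_hasValidPairs arr out) := by unfold Spec_hasValidPairs; infer_instance

-- ===== CLAIM (what is proved, stated in full; the proofs are below) =====
def Claim_equal_hasValidPairs : Prop := ∀ (arr : List Int), Dom_hasValidPairs arr → Spec_hasValidPairs arr (hasValidPairs arr)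

-- ===== LEMMAS AND PROOFS =====

-- if every candidate j fails the gap test, the inner scan returns false
theorem pvInnerA_false (s : List Int) (i : Int) (js : List Int)
    (h : ∀ j ∈ js, ¬ (PySem.List.pyGetD s j 0 - PySem.List.pyGetD s i 0 ≤ 1)) :
    pvInnerA s i js = false := by
  induction js with
  | nil => rfl
  | cons j rest ih =>
    simp only [pvInnerA]
    rw [if_neg (h j (by simp))]
    exact ih (fun j' hj' => h j' (by simp [hj']))

-- on a sorted list the inner scan succeeds iff the immediate neighbour is within 1
theorem pvInnerA_sorted (s : List Int) (hs : s.Pairwise (· ≤ ·)) (k : Nat)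
    (hk : k + 1 < s.length) :
    pvInnerA s (k : Int) (PySem.List.pyRange ((k : Int) + 1) (s.length : Int) 1) =
      decide (PySem.List.pyGetD s ((k : Int) + 1) 0 - PySem.List.pyGetD s (k : Int) 0 ≤ 1) := by
  rw [PySem.List.pyRange_one_cons (by exact_mod_cast hk)]
  simp only [pvInnerA]
  by_cases h : PySem.List.pyGetD s ((k : Int) + 1) 0 - PySem.List.pyGetD s (k : Int) 0 ≤ 1
  · rw [if_pos h]
    exact (decide_eq_true h).symm
  · rw [if_neg h]
    rw [decide_eq_false h]
    apply pvInnerA_false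
    intro j hj
    rw [PySem.List.mem_pyRange_one] at hj
    obtain ⟨hj1, hj2⟩ := hj
    have hknn : ((k : Int) + 1) = ((k + 1 : Nat) : Int) := by push_cast; ring
    have hjn : j = ((j.toNat : Nat) : Int) := by omega
    have hjlt : j.toNat < s.length := by omega
    have hle : s[k + 1] ≤ s[j.toNat] := by
      rcases Nat.eq_or_lt_of_le (show k + 1 ≤ j.toNat by omega) with heq | hlt
      · simp [heq]
      · exact (List.pairwise_iff_getElem.mp hs) _ _ hk hjlt hlt
    rw [hknn, PySem.List.pyGetD_natCast, List.getD_eq_getElem _ _ hk] at h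
    rw [hjn, PySem.List.pyGetD_natCast, List.getD_eq_getElem _ _ hjlt]
    omega

-- zip-with-tail all-check, characterised by adjacent indices
theorem pvZipAll (s : List Int) :
    ((s.zip (PySem.List.slice s (some 1) none)).all (fun p => decide (p.2 - p.1 ≤ 1))) = true ↔
      (∀ k : Nat, k + 1 < s.length → s.getD (k + 1) 0 - s.getD k 0 ≤ 1) := by
  rw [PySem.List.slice_from_one]
  simp only [List.all_eq_true, decide_eq_true_iff]
  constructor
  · intro h k hk
    have hkz : k < (s.zip s.tail).length := by
      simp only [List.length_zip, List.length_tail]; omega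
    have hmem := h _ (List.getElem_mem hkz)
    rw [List.getElem_zip] at hmem
    simp only [List.getElem_tail] at hmem
    rw [List.getD_eq_getElem _ _ hk, List.getD_eq_getElem _ _ (by omega : k < s.length)]
    exact hmem
  · rintro h ⟨x, y⟩ hmem
    rw [List.mem_iff_getElem] at hmem
    obtain ⟨k, hkl, hk⟩ := hmem
    have hk1 : k + 1 < s.length := by
      simp only [List.length_zip, List.length_tail] at hkl; omega
    have hx : x = s[k] := by
      have := congrArg Prod.fst hk
      rw [List.getElem_zip] at this
      exact this.symm
    have hy : y = s[k + 1] := by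
      have := congrArg Prod.snd hk
      rw [List.getElem_zip] at this
      simp only [List.getElem_tail] at this
      exact this.symm
    have := h k hk1
    rw [List.getD_eq_getElem _ _ hk1, List.getD_eq_getElem _ _ (by omega : k < s.length)] at this
    simp only [hx, hy]
    exact this

-- A's fold counts the adjacent gaps ≤ 1 of the sorted list
theorem pvPairsCount (s : List Int) (hs : s.Pairwise (· ≤ ·)) (n : Nat) (hn : n ≤ s.length) :
    ((PySem.List.pyRange 0 ((n : Int) - 1) 1).foldl
        (fun pairs i =>
          if pvInnerA s i (PySem.List.pyRange (i + 1) (s.length : Int) 1) then pairs + 1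
          else pairs) (0 : Int)) =
      ((List.range (n - 1)).countP
        (fun k => decide (s.getD (k + 1) 0 - s.getD k 0 ≤ 1)) : Int) := by
  induction n with
  | zero => simp [PySem.List.pyRange_one_eq_nil]
  | succ m ih =>
    rcases Nat.eq_zero_or_pos m with hm | hm
    · subst hm; simp [PySem.List.pyRange_one_eq_nil]
    · have hIH := ih (by omega)
      have hsplit : ((m + 1 : Nat) : Int) - 1 = ((m : Int) - 1) + 1 := by push_cast; ring
      rw [hsplit, PySem.List.pyRange_one_succ_right (by omega), List.foldl_append, hIH]
      have hmm : (m - 1) + 1 = m := by omega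
      have hrange : List.range ((m + 1) - 1) = List.range (m - 1) ++ [m - 1] := by
        have h1 : (m + 1) - 1 = (m - 1) + 1 := by omega
        rw [h1, List.range_succ]
      rw [hrange, List.countP_append]
      simp only [List.foldl_cons, List.foldl_nil, List.countP_cons, List.countP_nil]
      have hcast : ((m : Int) - 1) = (((m - 1 : Nat)) : Int) := by omega
      rw [hcast, pvInnerA_sorted s hs (m - 1) (by omega)]
      have hc2 : ((m - 1 : Nat) : Int) + 1 = ((m : Nat) : Int) := by omega
      rw [hc2, PySem.List.pyGetD_natCast, PySem.List.pyGetD_natCast, hmm]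
      by_cases hgap : s[m]?.getD 0 ≤ 1 + s[m - 1]?.getD 0
      · simp [hgap]
      · simp [hgap]

-- main equivalence on the sorted list
theorem pvMain (s : List Int) (hs : s.Pairwise (· ≤ ·)) :
    (decide ((s.length : Int) -
        ((PySem.List.pyRange 0 ((s.length : Int) - 1) 1).foldl
          (fun pairs i =>
            if pvInnerA s i (PySem.List.pyRange (i + 1) (s.length : Int) 1) then pairs + 1
            else pairs) (0 : Int)) = 1)) =
      (decide (s.length > 0) &&
        (s.zip (PySem.List.slice s (some 1) none)).all (fun p => decide (p.2 - p.1 ≤ 1))) := by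
  rw [pvPairsCount s hs s.length (le_refl _)]
  set p : Nat → Bool := fun k => decide (s.getD (k + 1) 0 - s.getD k 0 ≤ 1) with hp
  have hcle : (List.range (s.length - 1)).countP p ≤ s.length - 1 := by
    simpa using List.countP_le_length (l := List.range (s.length - 1)) (p := p)
  rcases Nat.eq_zero_or_pos s.length with h0 | h0
  · simp [List.length_eq_zero_iff.mp h0]
  · by_cases hall : ∀ k : Nat, k + 1 < s.length → s.getD (k + 1) 0 - s.getD k 0 ≤ 1
    · have hz := (pvZipAll s).mpr hall
      have hlenp : (List.range (s.length - 1)).countP p = (List.range (s.length - 1)).length := by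
        rw [List.countP_eq_length]
        intro k hk
        rw [List.mem_range] at hk
        simp only [hp, decide_eq_true_iff]
        exact hall k (by omega)
      rw [List.length_range] at hlenp
      rw [hz, Bool.and_true]
      have h1 : (s.length : Int) - ((List.range (s.length - 1)).countP p : Int) = 1 := by
        rw [hlenp]; omega
      simp [h1, h0]
    · have hz : ((s.zip (PySem.List.slice s (some 1) none)).all
          (fun q => decide (q.2 - q.1 ≤ 1))) = false := by
        rcases Bool.eq_false_or_eq_true ((s.zip (PySem.List.slice s (some 1) none)).all
            (fun q => decide (q.2 - q.1 ≤ 1))) with h | h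
        · exact absurd ((pvZipAll s).mp h) hall
        · exact h
      rw [hz, Bool.and_false]
      have hne : (List.range (s.length - 1)).countP p ≠ s.length - 1 := by
        intro hcp
        apply hall
        intro k hk
        have := List.countP_eq_length.mp (by rw [List.length_range]; exact hcp) k
          (by rw [List.mem_range]; omega)
        simpa [hp] using this
      have h1 : ¬ ((s.length : Int) - ((List.range (s.length - 1)).countP p : Int) = 1) := by
        omega
      simp [h1]

-- ===== VERDICT (by name: the statement is the Claim_ definition above) =====
theorem hasValidPairs_spec : Claim_equal_hasValidPairs := by
  intro arr _
  unfold Spec_hasValidPairs hasValidPairs hasValidPairs_alt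
  set s := PySem.List.sorted arr (fun x => x) false with hsdef
  have hs : s.Pairwise (· ≤ ·) := by
    simpa using PySem.List.sorted_pairwise arr (fun x => x)
  have hlen : s.length = arr.length := PySem.List.length_sorted arr (fun x => x) false
  by_cases h1 : arr.length = 1
  · -- singleton: A returns True immediately; B's zip is empty and s nonempty
    rw [if_pos (by simpa using h1)]
    have hs1 : s.length = 1 := by rw [hlen, h1]
    obtain ⟨x, hx⟩ := List.length_eq_one_iff.mp hs1
    simp [hx, PySem.List.slice_from_one]
  · rw [if_neg (by simpa using h1)]
    exact pvMain s hs
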